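-- pv_equiv track=rewrite | github.com/bssrdf/pyleet | PutBoxesIntotheWarehouseII.py | maxBoxesInWarehouse2
-- ===== SOURCE A (Python) =====
-- def maxBoxesInWarehouse2(boxes, warehouse):
--     '''
--     此题的本质是贪心法。我们首先需要有这样一个概念，在最终的排列中，高的箱子会摆放在靠
--     两边的位置。越高的箱子会摆得越靠边。
--
--     于是我们从高到低遍历每一个箱子，查看是否能fit仓库的第一个或者最后一个。如果两个都fit，那
--     我们挑一个较矮的仓库。于是我们就把这个箱子安置好了。于是我们将指向仓库两头的指针做
--     必要的移动，将其中一个挪开已经放置箱子的位置朝中间进发。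
--
--     然后我们考察下一个箱子。因为这个箱子比刚才的矮，所以必然可以穿越之前那个箱子所在的仓库，等价
--     于忽略掉warehouse的一个边缘元素。于是我们又面对一样的问题，此时的箱子能否fit仓库的第一个
--     或者最后一个？如果两个都fit，那么我们再挑一个较矮的仓库。于是双指针中的一个又可以往中间移动。
--     每移动一次就代表安置了一个箱子。
--
--     当箱子都遍历结束，或者双指针i>j的时候，就完成了探索。
--     '''
--     B, W = boxes, warehouse
--     B.sort(reverse=True)
--     ans, left, right = 0, 0, len(W)-1
--     for b in B:
--         if left > right:
--             break
--         if b > max(W[left], W[right]): continue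
--         if W[right] < b or W[left] >= b and W[left] < W[right]:
--             left += 1
--         else:
--             right -= 1
--         ans += 1
--     return ans
-- ===== SOURCE B (Python) =====
-- def maxBoxesInWarehouse2(boxes, warehouse):
--     # Different strategy: precompute each room's usable height as the max of the
--     # running minimum from the left and the running minimum from the right,
--     # sort those heights descending, and greedily match the boxes (sorted
--     # descending, mutating the argument like the original) with one pointer.
--     boxes.sort(reverse=True)
--     left = []
--     m = None
--     for w in warehouse:
--         m = w if m is None else min(m, w)
--         left.append(m)
--     right = []
--     m = None
--     for w in reversed(warehouse):
--         m = w if m is None else min(m, w)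
--         right.append(m)
--     right.reverse()
--     heights = sorted((max(a, b) for a, b in zip(left, right)), reverse=True)
--     n = len(heights)
--     ans = 0
--     p = 0
--     for b in boxes:
--         if p < n and b <= heights[p]:
--             p += 1
--             ans += 1
--     return ans
-- ===== Notes on version B (the rewrite author's own statement) =====
-- stated objective: alternative
-- what changed: A walks the raw warehouse with two end pointers deciding per box which end to consume; B precomputes each room's effective height (max of running minima from the left and from the right), sorts these heights descending, and counts matches with a single pointer over the sorted heights.
import Mathlib
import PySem

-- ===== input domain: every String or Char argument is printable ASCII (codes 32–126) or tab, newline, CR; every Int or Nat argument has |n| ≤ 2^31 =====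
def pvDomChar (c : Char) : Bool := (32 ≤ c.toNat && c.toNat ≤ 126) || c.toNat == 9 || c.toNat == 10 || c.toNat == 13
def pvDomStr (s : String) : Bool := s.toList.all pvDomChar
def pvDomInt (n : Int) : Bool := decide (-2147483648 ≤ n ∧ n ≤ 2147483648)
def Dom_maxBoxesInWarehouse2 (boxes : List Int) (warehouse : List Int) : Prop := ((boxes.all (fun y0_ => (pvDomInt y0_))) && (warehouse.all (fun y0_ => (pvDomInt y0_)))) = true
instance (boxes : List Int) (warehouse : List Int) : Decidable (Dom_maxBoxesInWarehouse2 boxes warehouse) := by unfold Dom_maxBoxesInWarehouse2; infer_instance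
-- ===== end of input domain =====

-- B re-implements A by precomputing per-room effective heights (max of running minima
-- from both ends), sorting them, and matching with one pointer; objective: alternative
-- algorithm of similar cost.  Both Pythons sort `boxes` in place (same side effect);
-- the equivalence proved here is about the return value.

-- ===== PORT A =====
-- A's loop over the descending-sorted boxes with state (ans, left, right); whenever
-- W[left]/W[right] is read the guard left ≤ right holds, so the index is in range and
-- pyGetD's default is never used.
def aLoop (W : List Int) : List Int → Int → Int → Int → Int
  | [], ans, _, _ => ans
  | b :: bs, ans, l, r =>
    if l > r then ans
    else if b > max (PySem.List.pyGetD W l 0) (PySem.List.pyGetD W r 0) then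
      aLoop W bs ans l r
    else if PySem.List.pyGetD W r 0 < b ∨
        (b ≤ PySem.List.pyGetD W l 0 ∧ PySem.List.pyGetD W l 0 < PySem.List.pyGetD W r 0) then
      aLoop W bs (ans + 1) (l + 1) r
    else
      aLoop W bs (ans + 1) l (r - 1)

def maxBoxesInWarehouse2 (boxes : List Int) (warehouse : List Int) : Int :=
  aLoop warehouse (PySem.List.sorted boxes (fun x => x) true) 0 0 ((warehouse.length : Int) - 1)

-- ===== PORT B =====
-- running minima accumulated exactly as in Source B's loops (list built by append + current min)
def runMins (ws : List Int) : List Int :=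
  (ws.foldl (fun (acc : List Int × Option Int) w =>
      let m := match acc.2 with | none => w | some m0 => min m0 w
      (acc.1 ++ [m], some m)) ([], none)).1

def bLoop (heights : List Int) (n : Int) : List Int → Int → Int → Int
  | [], ans, _ => ans
  | b :: bs, ans, p =>
    if p < n ∧ b ≤ PySem.List.pyGetD heights p 0 then bLoop heights n bs (ans + 1) (p + 1)
    else bLoop heights n bs ans p

def maxBoxesInWarehouse2_alt (boxes : List Int) (warehouse : List Int) : Int :=
  let bs := PySem.List.sorted boxes (fun x => x) true
  let left := runMins warehouse
  let right := (runMins warehouse.reverse).reverse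
  let heights := PySem.List.sorted ((left.zip right).map (fun p => max p.1 p.2)) (fun x => x) true
  bLoop heights (heights.length : Int) bs 0 0

-- ===== PRECONDITION & SPEC =====
def Spec_maxBoxesInWarehouse2 (boxes : List Int) (warehouse : List Int) (out : Int) : Prop := out = maxBoxesInWarehouse2_alt boxes warehouse
instance (boxes : List Int) (warehouse : List Int) (out : Int) : Decidable (Spec_maxBoxesInWarehouse2 boxes warehouse out) := by unfold Spec_maxBoxesInWarehouse2; infer_instance

-- ===== CLAIM (what is proved, stated in full; the proofs are below) =====
def Claim_equal_maxBoxesInWarehouse2 : Prop := ∀ (boxes : List Int) (warehouse : List Int), Dom_maxBoxesInWarehouse2 boxes warehouse → Spec_maxBoxesInWarehouse2 boxes warehouse (maxBoxesInWarehouse2 boxes warehouse)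

-- ===== LEMMAS AND PROOFS =====

-- proof-side notions: prefix minima, suffix minima, effective heights, descending sort
def preMins : List Int → List Int
  | [] => []
  | w :: ws => w :: (preMins ws).map (min w)

def sufMins (ws : List Int) : List Int := (preMins ws.reverse).reverse

def hList (ws : List Int) : List Int := List.zipWith max (preMins ws) (sufMins ws)

def sortD (l : List Int) : List Int := PySem.List.sorted l (fun x => x) true

-- B's greedy matcher on a plain list of heights
def Gc : List Int → List Int → Int
  | [], _ => 0
  | _ :: bs, [] => Gc bs []
  | b :: bs, h :: t => if b ≤ h then 1 + Gc bs t else Gc bs (h :: t)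

-- A's loop rephrased on the warehouse segment between the two pointers
def Aseg : List Int → List Int → Int
  | [], _ => 0
  | _ :: _, [] => 0
  | b :: bs, w :: ws =>
    if b > max w ((w :: ws).getLast (by simp)) then Aseg bs (w :: ws)
    else if (w :: ws).getLast (by simp) < b ∨ (b ≤ w ∧ w < (w :: ws).getLast (by simp)) then
      1 + Aseg bs ws
    else
      1 + Aseg bs (w :: ws).dropLast

-- "equal, or both at least b": the slack the greedy matcher cannot observe
def Qb (b x y : Int) : Prop := x = y ∨ (b ≤ x ∧ b ≤ y)

def RelB (b : Int) (s t : List Int) : Prop := List.Forall₂ (Qb b) s t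

lemma rel_refl (b : Int) (s : List Int) : RelB b s s := by
  induction s with
  | nil => exact List.Forall₂.nil
  | cons x xs ih => exact List.Forall₂.cons (Or.inl rfl) ih
lemma rel_symm {b : Int} {s t : List Int} (h : RelB b s t) : RelB b t s := by
  induction h with
  | nil => exact List.Forall₂.nil
  | cons hq _ ih =>
    refine List.Forall₂.cons ?_ ih
    rcases hq with h | ⟨h1, h2⟩
    · exact Or.inl h.symm
    · exact Or.inr ⟨h2, h1⟩
lemma rel_trans {b : Int} {s t u : List Int} (h1 : RelB b s t) (h2 : RelB b t u) : RelB b s u := by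
  induction h1 generalizing u with
  | nil => cases h2; exact List.Forall₂.nil
  | cons hq _ ih =>
    cases h2 with
    | cons hq' htail =>
      refine List.Forall₂.cons ?_ (ih htail)
      rcases hq with h | ⟨ha1, ha2⟩
      · rcases hq' with h' | ⟨hb1, hb2⟩
        · exact Or.inl (h.trans h')
        · exact Or.inr ⟨h ▸ hb1, hb2⟩
      · rcases hq' with h' | ⟨hb1, hb2⟩
        · exact Or.inr ⟨ha1, h' ▸ ha2⟩
        · exact Or.inr ⟨ha1, hb2⟩
lemma rel_mono {b b' : Int} (hb : b' ≤ b) {s t : List Int} (h : RelB b s t) : RelB b' s t := by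
  induction h with
  | nil => exact List.Forall₂.nil
  | cons hq _ ih =>
    refine List.Forall₂.cons ?_ ih
    rcases hq with h | ⟨h1, h2⟩
    · exact Or.inl h
    · exact Or.inr ⟨le_trans hb h1, le_trans hb h2⟩

lemma gc_nil (bs : List Int) : Gc bs [] = 0 := by
  induction bs with
  | nil => rfl
  | cons b bs ih => simpa [Gc] using ih

lemma sortD_pairwise (l : List Int) : (sortD l).Pairwise (fun a c => c ≤ a) :=
  PySem.List.sorted_pairwise_rev l (fun x => x)
lemma sortD_perm (l : List Int) : (sortD l).Perm l :=
  PySem.List.sorted_perm l (fun x => x) true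
lemma sortD_unique {l1 l2 : List Int} (hp : l1.Perm l2)
    (h1 : l1.Pairwise (fun a c => c ≤ a)) (h2 : l2.Pairwise (fun a c => c ≤ a)) : l1 = l2 :=
  PySem.List.eq_of_perm_of_pairwise_le_of_injective (fun x => -x) neg_injective hp
    (h1.imp (fun h => neg_le_neg h)) (h2.imp (fun h => neg_le_neg h))
lemma sortD_congr_perm {l1 l2 : List Int} (h : l1.Perm l2) : sortD l1 = sortD l2 :=
  sortD_unique (((sortD_perm l1).trans h).trans (sortD_perm l2).symm)
    (sortD_pairwise l1) (sortD_pairwise l2)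

lemma not_ge_eq_lt (b : Int) : (fun x : Int => !decide (b ≤ x)) = (fun x : Int => decide (x < b)) := by
  funext x
  rcases lt_or_ge x b with h | h
  · simp [h, not_le.mpr h]
  · simp [h, not_lt.mpr h]

lemma sortD_split (b : Int) (l : List Int) :
    sortD l = sortD (l.filter (fun x => decide (b ≤ x))) ++ sortD (l.filter (fun x => decide (x < b))) := by
  apply sortD_unique
  · refine ((sortD_perm l).trans ?_).trans
      (List.Perm.append (sortD_perm _).symm (sortD_perm _).symm)
    have hp := List.filter_append_perm (fun x => decide (b ≤ x)) l
    refine hp.symm.trans (List.Perm.append (List.Perm.refl _) ?_)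
    rw [not_ge_eq_lt]
  · exact sortD_pairwise l
  · rw [List.pairwise_append]
    refine ⟨sortD_pairwise _, sortD_pairwise _, ?_⟩
    intro x hx y hy
    have hx' : x ∈ l.filter (fun x => decide (b ≤ x)) := (sortD_perm _).mem_iff.mp hx
    have hy' : y ∈ l.filter (fun x => decide (x < b)) := (sortD_perm _).mem_iff.mp hy
    have h1 := List.of_mem_filter hx'
    have h2 := List.of_mem_filter hy'
    simp at h1 h2
    omega

lemma rel_of_all_ge {b : Int} {s t : List Int} (hlen : s.length = t.length)
    (hs : ∀ x ∈ s, b ≤ x) (ht : ∀ y ∈ t, b ≤ y) : RelB b s t := by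
  induction s generalizing t with
  | nil => cases t with
    | nil => exact List.Forall₂.nil
    | cons y ys => simp at hlen
  | cons x xs ih =>
    cases t with
    | nil => simp at hlen
    | cons y ys =>
      refine List.Forall₂.cons (Or.inr ⟨hs x (by simp), ht y (by simp)⟩) ?_
      exact ih (by simpa using hlen) (fun z hz => hs z (by simp [hz]))
        (fun z hz => ht z (by simp [hz]))

lemma forall₂_filter_lt {b : Int} : ∀ {l1 l2 : List Int}, List.Forall₂ (Qb b) l1 l2 →
    l1.filter (fun x => decide (x < b)) = l2.filter (fun x => decide (x < b)) := by
  intro l1 l2 h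
  induction h with
  | nil => rfl
  | @cons x y xs ys hq _ ih =>
    rcases hq with hxy | ⟨h1, h2⟩
    · subst hxy
      by_cases hx : x < b <;> simp [List.filter, hx, ih]
    · have hx : ¬ x < b := by omega
      have hy : ¬ y < b := by omega
      simp [List.filter, hx, hy, ih]

lemma forall₂_append {R : Int → Int → Prop} {a b c d : List Int}
    (h1 : List.Forall₂ R a b) (h2 : List.Forall₂ R c d) : List.Forall₂ R (a ++ c) (b ++ d) := by
  induction h1 with
  | nil => exact h2
  | cons hq _ ih => exact List.Forall₂.cons hq ih

lemma length_filter_ge_eq {b : Int} {l1 l2 : List Int} (h : List.Forall₂ (Qb b) l1 l2) :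
    (l1.filter (fun x => decide (b ≤ x))).length = (l2.filter (fun x => decide (b ≤ x))).length := by
  have hl : l1.length = l2.length := h.length_eq
  have h1 := (List.filter_append_perm (fun x => decide (b ≤ x)) l1).length_eq
  have h2 := (List.filter_append_perm (fun x => decide (b ≤ x)) l2).length_eq
  rw [not_ge_eq_lt] at h1 h2
  rw [forall₂_filter_lt h] at h1
  simp only [List.length_append] at h1 h2
  omega

-- K2: pointwise Qb survives descending sorting
lemma relK2 {b : Int} {l1 l2 : List Int} (h : List.Forall₂ (Qb b) l1 l2) :
    RelB b (sortD l1) (sortD l2) := by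
  rw [sortD_split b l1, sortD_split b l2, forall₂_filter_lt h]
  refine forall₂_append ?_ (rel_refl _ _)
  refine rel_of_all_ge ?_ ?_ ?_
  · rw [(sortD_perm _).length_eq, (sortD_perm _).length_eq]
    exact length_filter_ge_eq h
  · intro x hx
    have := List.of_mem_filter ((sortD_perm _).mem_iff.mp hx); simpa using this
  · intro y hy
    have := List.of_mem_filter ((sortD_perm _).mem_iff.mp hy); simpa using this

-- K3: dropping the head of the sorted list after inserting w ≥ b relates to not inserting it
lemma relK3 {b w : Int} (hw : b ≤ w) (X : List Int) :
    RelB b (sortD X) ((sortD (w :: X)).tail) := by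
  have hfge : (w :: X).filter (fun x => decide (b ≤ x)) = w :: X.filter (fun x => decide (b ≤ x)) := by
    simp [List.filter, hw]
  have hflt : (w :: X).filter (fun x => decide (x < b)) = X.filter (fun x => decide (x < b)) := by
    have : ¬ w < b := by omega
    simp [List.filter, this]
  rw [sortD_split b X, sortD_split b (w :: X), hfge, hflt]
  obtain ⟨m, t, hmt⟩ : ∃ m t, sortD (w :: X.filter (fun x => decide (b ≤ x))) = m :: t := by
    cases hs : sortD (w :: X.filter (fun x => decide (b ≤ x))) with
    | nil => exact absurd ((PySem.List.sorted_eq_nil_iff _ _ _).mp hs) (by simp)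
    | cons m t => exact ⟨m, t, rfl⟩
  rw [hmt]
  simp only [List.cons_append, List.tail_cons]
  refine forall₂_append ?_ (rel_refl _ _)
  refine rel_of_all_ge ?_ ?_ ?_
  · have h1 : (sortD (X.filter (fun x => decide (b ≤ x)))).length
        = (X.filter (fun x => decide (b ≤ x))).length := (sortD_perm _).length_eq
    have h2 : (m :: t).length = (w :: X.filter (fun x => decide (b ≤ x))).length := by
      rw [← hmt]; exact (sortD_perm _).length_eq
    simp at h1 h2 ⊢
    omega
  · intro x hx
    have := List.of_mem_filter ((sortD_perm _).mem_iff.mp hx); simpa using this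
  · intro y hy
    have hy' : y ∈ m :: t := by simp [hy]
    rw [← hmt] at hy'
    have hy'' := (sortD_perm _).mem_iff.mp hy'
    rcases List.mem_cons.mp hy'' with h | h
    · omega
    · have := List.of_mem_filter h; simpa using this

lemma preMins_length (ws : List Int) : (preMins ws).length = ws.length := by
  induction ws with
  | nil => rfl
  | cons w ws ih => simp [preMins, ih]
lemma sufMins_length (ws : List Int) : (sufMins ws).length = ws.length := by
  simp [sufMins, preMins_length]
lemma hList_length (ws : List Int) : (hList ws).length = ws.length := by
  simp [hList, preMins_length, sufMins_length]

lemma preMins_append_singleton (xs : List Int) (a : Int) :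
    preMins (xs ++ [a]) = preMins xs ++ [xs.foldr min a] := by
  induction xs with
  | nil => rfl
  | cons x xs ih => simp [preMins, ih, List.foldr]

lemma sufMins_cons (w : Int) (ws : List Int) :
    sufMins (w :: ws) = ws.reverse.foldr min w :: sufMins ws := by
  simp [sufMins, List.reverse_cons, preMins_append_singleton]

lemma foldr_min_le (a : Int) (xs : List Int) : xs.foldr min a ≤ a := by
  induction xs with
  | nil => simp
  | cons x xs ih => simp [List.foldr]; omega

lemma mem_preMins_le (w : Int) (ws : List Int) : ∀ x ∈ preMins (w :: ws), x ≤ w := by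
  intro x hx
  simp only [preMins, List.mem_cons, List.mem_map] at hx
  rcases hx with h | ⟨y, _, hy⟩
  · omega
  · subst hy; exact min_le_left _ _

lemma hList_cons (w : Int) (ws : List Int) :
    hList (w :: ws) = w :: List.zipWith max ((preMins ws).map (min w)) (sufMins ws) := by
  simp only [hList, sufMins_cons, preMins, List.zipWith_cons_cons,
    max_eq_left (foldr_min_le w ws.reverse)]

lemma preMins_reverse (ws : List Int) : preMins ws.reverse = (sufMins ws).reverse := by
  simp [sufMins]

lemma sufMins_reverse (ws : List Int) : sufMins ws.reverse = (preMins ws).reverse := by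
  simp [sufMins]

lemma hList_reverse (ws : List Int) : hList ws.reverse = (hList ws).reverse := by
  have hlen : (sufMins ws).length = (preMins ws).length := by
    simp [preMins_length, sufMins_length]
  rw [hList, preMins_reverse, sufMins_reverse,
    ← List.reverse_zipWith hlen, hList,
    List.zipWith_comm_of_comm (fun a b => max_comm a b)]

-- K1: effective heights of the shrunken warehouse vs the tail of the old height list
lemma relK1 {b w : Int} (hw : b ≤ w) (ws : List Int) :
    List.Forall₂ (Qb b) (hList ws) ((hList (w :: ws)).tail) := by
  rw [hList_cons, List.tail_cons, hList]
  have hlen : (preMins ws).length = (sufMins ws).length := by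
    simp [preMins_length, sufMins_length]
  clear hlen
  generalize preMins ws = pm
  generalize sufMins ws = sm
  induction pm generalizing sm with
  | nil => simp
  | cons p pt ih =>
    cases sm with
    | nil => exact List.Forall₂.nil
    | cons q qt =>
      simp only [List.zipWith, List.map]
      refine List.Forall₂.cons ?_ (ih qt)
      by_cases hp : p ≤ w
      · have : min w p = p := by omega
        exact Or.inl (by rw [this])
      · have h1 : b ≤ max p q := by have := le_max_left p q; omega
        have h2 : b ≤ max (min w p) q := by
          have : min w p = w := by omega
          rw [this]; have := le_max_left w q; omega
        exact Or.inr ⟨h1, h2⟩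

lemma zipWith_max_le {u v : Int} : ∀ (l1 l2 : List Int), (∀ a ∈ l1, a ≤ u) → (∀ c ∈ l2, c ≤ v) →
    ∀ x ∈ List.zipWith max l1 l2, x ≤ max u v := by
  intro l1
  induction l1 with
  | nil => intro l2 _ _ x hx; simp at hx
  | cons a l1 ih =>
    intro l2 h1 h2 x hx
    cases l2 with
    | nil => simp at hx
    | cons c l2 =>
      simp only [List.zipWith_cons_cons, List.mem_cons] at hx
      rcases hx with h | h
      · have ha := h1 a (by simp)
        have hc := h2 c (by simp)
        subst h
        exact max_le_max ha hc
      · exact ih l2 (fun z hz => h1 z (by simp [hz])) (fun z hz => h2 z (by simp [hz])) x h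

lemma mem_sufMins_le (w : Int) (ws : List Int) :
    ∀ x ∈ sufMins (w :: ws), x ≤ (w :: ws).getLast (by simp) := by
  intro x hx
  cases hrev : (w :: ws).reverse with
  | nil => simp at hrev
  | cons a t =>
    have hne : (w :: ws).reverse ≠ [] := by simp
    have ha : a = (w :: ws).getLast (by simp) := by
      have h := List.head_reverse hne
      simp only [hrev, List.head_cons] at h
      exact h
    rw [sufMins, List.mem_reverse, hrev] at hx
    rw [← ha]
    exact mem_preMins_le a t x hx

lemma mem_hList_le (w : Int) (ws : List Int) :
    ∀ x ∈ hList (w :: ws), x ≤ max w ((w :: ws).getLast (by simp)) := by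
  rw [hList]
  exact zipWith_max_le _ _ (mem_preMins_le w ws) (mem_sufMins_le w ws)

lemma hList_ne_nil (w : Int) (ws : List Int) : hList (w :: ws) ≠ [] := by
  simp [← List.length_eq_zero_iff, hList_length]

lemma hList_getLast (w : Int) (ws : List Int) :
    (hList (w :: ws)).getLast (hList_ne_nil w ws) = (w :: ws).getLast (by simp) := by
  cases hrev : (w :: ws).reverse with
  | nil => simp at hrev
  | cons a t =>
    have hne : (w :: ws).reverse ≠ [] := by simp
    have ha : a = (w :: ws).getLast (by simp) := by
      have h := List.head_reverse hne
      simp only [hrev, List.head_cons] at h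
      exact h
    have h2 : (hList (w :: ws)).reverse
        = a :: List.zipWith max ((preMins t).map (min a)) (sufMins t) := by
      rw [← hList_reverse, hrev, hList_cons]
    have h3 : (hList (w :: ws)).reverse.head (by simp [h2]) = a := by simp [h2]
    rw [List.head_reverse] at h3
    rw [h3, ha]

lemma hList_cons_tail (w : Int) (ws : List Int) :
    hList (w :: ws) = w :: (hList (w :: ws)).tail := by
  rw [hList_cons, List.tail_cons]

-- dropping the consumed left room: heights of the rest vs tail of the sorted heights
lemma rel_left {b w : Int} (hw : b ≤ w) (ws : List Int) :
    RelB b (sortD (hList ws)) ((sortD (hList (w :: ws))).tail) := by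
  refine rel_trans (relK2 (relK1 hw ws)) ?_
  have h := relK3 hw ((hList (w :: ws)).tail)
  rw [← hList_cons_tail] at h
  exact h

-- dropping the consumed right room, by symmetry through reversal
lemma rel_right {b : Int} {W : List Int} (hne : W ≠ [])
    (hw : b ≤ W.getLast hne) (t : List Int) (hrev : W.reverse = W.getLast hne :: t) :
    RelB b (sortD (hList W.dropLast)) ((sortD (hList W)).tail) := by
  have hW : W = t.reverse ++ [W.getLast hne] := by
    have := congrArg List.reverse hrev
    simpa using this
  have hdl : W.dropLast = t.reverse := by rw [hW]; simp
  have h1 : sortD (hList W.dropLast) = sortD (hList t) := by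
    rw [hdl, hList_reverse]
    exact sortD_congr_perm (List.reverse_perm _)
  have h2 : sortD (hList (W.getLast hne :: t)) = sortD (hList W) := by
    rw [← hrev, hList_reverse]
    exact sortD_congr_perm (List.reverse_perm _)
  rw [h1, ← h2]
  exact rel_left hw t

-- the heart: A's segment recursion equals B's greedy matcher on the sorted effective heights
lemma rel_head_cases {b : Int} {w : Int} {ws s : List Int}
    (h : RelB b s (sortD (hList (w :: ws)))) :
    ∃ s0 st m t, s = s0 :: st ∧ sortD (hList (w :: ws)) = m :: t ∧
      (s0 = m ∨ (b ≤ s0 ∧ b ≤ m)) ∧ RelB b st t := by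
  cases hs : sortD (hList (w :: ws)) with
  | nil => exact absurd ((PySem.List.sorted_eq_nil_iff _ _ _).mp hs) (hList_ne_nil w ws)
  | cons m t =>
    rw [hs] at h
    cases h with
    | @cons s0 _ st _ hq htail => exact ⟨s0, st, m, t, rfl, rfl, hq, htail⟩

lemma sorted_head_ge {w : Int} {ws : List Int} {m : Int} {t : List Int}
    (hs : sortD (hList (w :: ws)) = m :: t) :
    w ≤ m ∧ (w :: ws).getLast (by simp) ≤ m := by
  have hmem1 : w ∈ hList (w :: ws) := by rw [hList_cons]; simp
  have hmem2 : (w :: ws).getLast (by simp) ∈ hList (w :: ws) := by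
    rw [← hList_getLast w ws]
    exact List.getLast_mem _
  exact ⟨PySem.List.key_head_sorted_rev_ge _ _ hs w hmem1,
    PySem.List.key_head_sorted_rev_ge _ _ hs _ hmem2⟩

lemma main_lemma : ∀ (bs : List Int) (b : Int) (W s : List Int),
    List.Pairwise (fun a c => c ≤ a) (b :: bs) → RelB b s (sortD (hList W)) →
    Aseg (b :: bs) W = Gc (b :: bs) s := by
  intro bs
  induction bs with
  | nil =>
    intro b W s _ hrel
    cases W with
    | nil =>
      have hs : s = [] := by
        have := hrel.length_eq
        simp [sortD, hList, preMins, sufMins] at this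
        simpa [List.length_eq_zero_iff] using this
      subst hs; rfl
    | cons w ws =>
      obtain ⟨s0, st, m, t, hseq, hsort, hq, _⟩ := rel_head_cases hrel
      subst hseq
      obtain ⟨hm1, hm2⟩ := sorted_head_ge hsort
      by_cases hskip : b > max w ((w :: ws).getLast (by simp))
      · have hmlt : m < b := by
          have := mem_hList_le w ws m ((sortD_perm _).mem_iff.mp (by rw [hsort]; simp))
          omega
        have hs0 : ¬ b ≤ s0 := by rcases hq with h | h <;> omega
        simp only [Aseg, if_pos hskip, Gc, if_neg hs0]
      · have hble : b ≤ max w ((w :: ws).getLast (by simp)) := by omega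
        have hs0 : b ≤ s0 := by rcases hq with h | h; · subst h; omega
                                · exact h.1
        simp only [Aseg, if_neg hskip, Gc, if_pos hs0]
        split <;> rfl
  | cons b' bs ih =>
    intro b W s hb hrel
    have hb' : b' ≤ b := (List.pairwise_cons.mp hb).1 b' (by simp)
    have hbsbound : List.Pairwise (fun a c => c ≤ a) (b' :: bs) := (List.pairwise_cons.mp hb).2
    cases W with
    | nil =>
      have hs : s = [] := by
        have := hrel.length_eq
        simp [sortD, hList, preMins, sufMins] at this
        simpa [List.length_eq_zero_iff] using this
      subst hs
      simp [Aseg, gc_nil]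
    | cons w ws =>
      obtain ⟨s0, st, m, t, hseq, hsort, hq, hrtail⟩ := rel_head_cases hrel
      subst hseq
      obtain ⟨hm1, hm2⟩ := sorted_head_ge hsort
      by_cases hskip : b > max w ((w :: ws).getLast (by simp))
      · have hmlt : m < b := by
          have := mem_hList_le w ws m ((sortD_perm _).mem_iff.mp (by rw [hsort]; simp))
          omega
        have hs0 : ¬ b ≤ s0 := by rcases hq with h | h <;> omega
        simp only [Aseg, if_pos hskip, Gc, if_neg hs0]
        exact ih b' (w :: ws) (s0 :: st) hbsbound
          (rel_mono hb' hrel)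
      · have hble : b ≤ max w ((w :: ws).getLast (by simp)) := by omega
        have hs0 : b ≤ s0 := by rcases hq with h | h; · subst h; omega
                                · exact h.1
        have htail_rel : RelB b st ((sortD (hList (w :: ws))).tail) := by
          rw [hsort]; simpa using hrtail
        simp only [Aseg, if_neg hskip, Gc, if_pos hs0]
        split
        · -- consume the left room
          rename_i hcond
          have hw : b ≤ w := by
            rcases hcond with h | h
            · omega
            · exact h.1
          have hnext : RelB b' st (sortD (hList ws)) :=
            rel_mono hb' (rel_trans htail_rel (rel_symm (rel_left hw ws)))
          rw [ih b' ws st hbsbound hnext]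
        · -- consume the right room
          rename_i hcond
          have hwl : b ≤ (w :: ws).getLast (by simp) := by omega
          cases hrev : (w :: ws).reverse with
          | nil => simp at hrev
          | cons a t' =>
            have hne : (w :: ws).reverse ≠ [] := by simp
            have ha : a = (w :: ws).getLast (by simp) := by
              have h := List.head_reverse hne
              simp only [hrev, List.head_cons] at h
              exact h
            have hrev' : (w :: ws).reverse = (w :: ws).getLast (by simp) :: t' := by
              rw [hrev, ha]
            have hnext : RelB b' st (sortD (hList ((w :: ws).dropLast))) :=
              rel_mono hb' (rel_trans htail_rel
                (rel_symm (rel_right (by simp) hwl t' hrev')))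
            rw [ih b' ((w :: ws).dropLast) st hbsbound hnext]

-- an unfolding of Aseg's cons case with the last element named
lemma Aseg_cons_eq (b : Int) (bs : List Int) (w : Int) (ws : List Int) (wl : Int)
    (hwl : (w :: ws).getLast (by simp) = wl) :
    Aseg (b :: bs) (w :: ws)
      = if b > max w wl then Aseg bs (w :: ws)
        else if wl < b ∨ (b ≤ w ∧ w < wl) then 1 + Aseg bs ws
        else 1 + Aseg bs (w :: ws).dropLast := by
  subst hwl
  simp only [Aseg]

-- bridge A: the indexed loop is the segment recursion
lemma aLoop_eq_aseg (W : List Int) : ∀ (bs : List Int) (ans l r : Int),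
    0 ≤ l → l ≤ r + 1 → r < (W.length : Int) →
    aLoop W bs ans l r = ans + Aseg bs ((W.drop l.toNat).take (r + 1 - l).toNat) := by
  intro bs
  induction bs with
  | nil =>
    intro ans l r _ _ _
    simp [aLoop, Aseg]
  | cons b bs ih =>
    intro ans l r h0 h1 h2
    by_cases hlr : l > r
    · have hk0 : (r + 1 - l).toNat = 0 := by omega
      simp [aLoop, hlr, hk0, Aseg]
    · have hlr' : l ≤ r := by omega
      have hlW : l.toNat < W.length := by omega
      have hrW : r.toNat < W.length := by omega
      obtain ⟨k', hk'⟩ : ∃ k', (r + 1 - l).toNat = k' + 1 := ⟨(r - l).toNat, by omega⟩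
      have hk'r : l.toNat + k' = r.toNat := by omega
      have hcons : (W.drop l.toNat).take (r + 1 - l).toNat
          = W[l.toNat] :: (W.drop (l + 1).toNat).take (r + 1 - (l + 1)).toNat := by
        rw [List.drop_eq_getElem_cons hlW, hk', List.take_succ_cons]
        have e1 : (l + 1).toNat = l.toNat + 1 := by omega
        have e2 : (r + 1 - (l + 1)).toNat = k' := by omega
        rw [e1, e2]
      have hconcat : (W.drop l.toNat).take (r + 1 - l).toNat
          = (W.drop l.toNat).take k' ++ [W[r.toNat]] := by
        have hopt : (W.drop l.toNat)[k']? = some W[r.toNat] := by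
          rw [List.getElem?_drop, show l.toNat + k' = r.toNat from hk'r,
            List.getElem?_eq_getElem hrW]
        rw [hk', List.take_add_one, hopt]
        rfl
      have hwl : (W[l.toNat] :: (W.drop (l + 1).toNat).take (r + 1 - (l + 1)).toNat).getLast (by simp)
          = W[r.toNat] := by
        have hq : (W[l.toNat] :: (W.drop (l + 1).toNat).take (r + 1 - (l + 1)).toNat).getLast?
            = some W[r.toNat] := by
          rw [← hcons, hconcat]
          exact List.getLast?_concat
        have h1 := List.getLast?_eq_some_getLast
          (l := W[l.toNat] :: (W.drop (l + 1).toNat).take (r + 1 - (l + 1)).toNat) (by simp)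
        rw [hq] at h1
        exact (Option.some.inj h1).symm
      have hgl : PySem.List.pyGetD W l 0 = W[l.toNat] :=
        PySem.List.pyGetD_eq_getElem W 0 h0 (by omega)
      have hgr : PySem.List.pyGetD W r 0 = W[r.toNat] :=
        PySem.List.pyGetD_eq_getElem W 0 (by omega) (by omega)
      have hdl : (W[l.toNat] :: (W.drop (l + 1).toNat).take (r + 1 - (l + 1)).toNat).dropLast
          = (W.drop l.toNat).take (r - 1 + 1 - l).toNat := by
        rw [← hcons, hconcat, List.dropLast_concat]
        congr 1
        omega
      simp only [aLoop, hgl, hgr, if_neg (by omega : ¬ l > r)]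
      rw [hcons, Aseg_cons_eq b bs _ _ _ hwl]
      by_cases hc1 : b > max W[l.toNat] W[r.toNat]
      · rw [if_pos hc1, if_pos hc1, ← hcons]
        exact ih ans l r h0 h1 h2
      · rw [if_neg hc1, if_neg hc1]
        by_cases hc2 : W[r.toNat] < b ∨ (b ≤ W[l.toNat] ∧ W[l.toNat] < W[r.toNat])
        · rw [if_pos hc2, if_pos hc2]
          rw [ih (ans + 1) (l + 1) r (by omega) (by omega) h2]
          omega
        · rw [if_neg hc2, if_neg hc2]
          rw [hdl, ih (ans + 1) l (r - 1) h0 (by omega) (by omega)]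
          omega

-- bridge B: the pointer loop is the greedy matcher
lemma bLoop_eq_gc (heights : List Int) : ∀ (bs : List Int) (ans p : Int), 0 ≤ p →
    bLoop heights (heights.length : Int) bs ans p = ans + Gc bs (heights.drop p.toNat) := by
  intro bs
  induction bs with
  | nil => intro ans p _; simp [bLoop, Gc]
  | cons b bs ih =>
    intro ans p hp
    by_cases hlt : p < (heights.length : Int)
    · have hplen : p.toNat < heights.length := by omega
      have hdrop : heights.drop p.toNat = heights[p.toNat] :: heights.drop (p.toNat + 1) :=
        List.drop_eq_getElem_cons hplen
      have hg : PySem.List.pyGetD heights p 0 = heights[p.toNat] :=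
        PySem.List.pyGetD_eq_getElem heights 0 hp hlt
      simp only [bLoop, hg, hdrop]
      by_cases hb : b ≤ heights[p.toNat]
      · rw [if_pos ⟨hlt, hb⟩]
        rw [ih (ans + 1) (p + 1) (by omega)]
        have e : (p + 1).toNat = p.toNat + 1 := by omega
        rw [e]
        simp only [Gc, if_pos hb]
        omega
      · rw [if_neg (by tauto)]
        rw [ih ans p hp, hdrop]
        simp only [Gc, if_neg hb]
    · have hdrop : heights.drop p.toNat = [] := by
        apply List.drop_eq_nil_of_le
        omega
      simp only [bLoop, if_neg (by omega : ¬ (p < (heights.length : Int) ∧ b ≤ PySem.List.pyGetD heights p 0))]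
      rw [ih ans p hp, hdrop]
      simp [gc_nil]

lemma runMins_aux : ∀ (ws acc : List Int) (m : Int),
    (ws.foldl (fun (acc : List Int × Option Int) w =>
      let m := match acc.2 with | none => w | some m0 => min m0 w
      (acc.1 ++ [m], some m)) (acc, some m)).1 = acc ++ (preMins ws).map (min m) := by
  intro ws
  induction ws with
  | nil => intro acc m; simp [preMins]
  | cons w ws ih =>
    intro acc m
    simp only [List.foldl_cons]
    rw [ih (acc ++ [min m w]) (min m w)]
    simp [preMins, List.map_map, Function.comp_def, min_assoc]

lemma runMins_eq_preMins (ws : List Int) : runMins ws = preMins ws := by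
  cases ws with
  | nil => rfl
  | cons w ws =>
    calc runMins (w :: ws)
        = (ws.foldl (fun (acc : List Int × Option Int) w =>
            let m := match acc.2 with | none => w | some m0 => min m0 w
            (acc.1 ++ [m], some m)) ([w], some w)).1 := rfl
      _ = [w] ++ (preMins ws).map (min w) := runMins_aux ws [w] w
      _ = preMins (w :: ws) := by simp [preMins]

lemma zip_map_max : ∀ (l r : List Int), (l.zip r).map (fun p => max p.1 p.2) = List.zipWith max l r := by
  intro l
  induction l with
  | nil => intro r; simp
  | cons x xs ih =>
    intro r
    cases r with
    | nil => simp
    | cons y ys => simp [ih]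

lemma heights_eq_hList (warehouse : List Int) :
    ((runMins warehouse).zip ((runMins warehouse.reverse).reverse)).map (fun p => max p.1 p.2)
      = hList warehouse := by
  rw [zip_map_max, runMins_eq_preMins, runMins_eq_preMins, hList, sufMins]

-- ===== VERDICT (by name: the statement is the Claim_ definition above) =====
theorem maxBoxesInWarehouse2_spec : Claim_equal_maxBoxesInWarehouse2 := by
  unfold Claim_equal_maxBoxesInWarehouse2
  intro boxes warehouse _
  unfold Spec_maxBoxesInWarehouse2
  simp only [maxBoxesInWarehouse2, maxBoxesInWarehouse2_alt]
  rw [aLoop_eq_aseg warehouse _ 0 0 ((warehouse.length : Int) - 1) le_rfl (by omega) (by omega)]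
  rw [bLoop_eq_gc _ _ 0 0 le_rfl]
  have hseg : (warehouse.drop (0 : Int).toNat).take (((warehouse.length : Int) - 1) + 1 - 0).toNat
      = warehouse := by
    simp
  have hH : PySem.List.sorted
      (((runMins warehouse).zip ((runMins warehouse.reverse).reverse)).map (fun p => max p.1 p.2))
      (fun x => x) true = sortD (hList warehouse) := by
    rw [heights_eq_hList]
    rfl
  rw [hseg, show Int.toNat 0 = 0 from rfl, List.drop_zero, hH]
  cases hB : PySem.List.sorted boxes (fun x => x) true with
  | nil => rfl
  | cons b bs =>
    have hpw : List.Pairwise (fun a c => c ≤ a) (b :: bs) := by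
      have h := PySem.List.sorted_pairwise_rev boxes (fun x => x)
      rw [hB] at h
      exact h
    rw [main_lemma bs b warehouse (sortD (hList warehouse)) hpw (rel_refl _ _)]
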